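-- pv_equiv track=rewrite | github.com/guillochon/retrosheet-buddy | retrosheet_buddy/editor.py | _calculate_count
-- ===== SOURCE A (Python) =====
-- def _calculate_count(pitches: str, start_count: str = "00") -> str:
--     """Calculate count from pitch sequence following baseball rules.
--
--     If a non-default ``start_count`` is provided (e.g., when the prior play
--     involves the same batter in the same inning), begin from that count
--     instead of "00".
--
--     Display rules:
--     - Balls are capped at 3 for display
--     - Strikes are capped at 2 for display
--     """
--     # Initialize from starting count
--     try:
--         start_balls = int(start_count[0]) if start_count else 0
--         start_strikes = int(start_count[1]) if start_count else 0
--     except (ValueError, IndexError):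
--         start_balls, start_strikes = 0, 0
--
--     balls = start_balls
--     strikes = start_strikes
--
--     for pitch in pitches:
--         if pitch == "B":
--             balls += 1
--         elif pitch in ["S", "C"]:  # Swinging strike, Called strike
--             strikes += 1
--         elif pitch == "F":  # Foul ball
--             # Foul balls only count as strikes up to 2 strikes
--             if strikes < 2:
--                 strikes += 1
--         elif pitch == "T":  # Foul tip
--             # Foul tips count as strikes and can result in strikeout
--             strikes += 1
--         # Other pitch types (H, V, A, M, P, I, Q, R, E, N, O, U) don't affect count
--
--     # Cap balls at 3 and strikes at 2 for display (never show 3 strikes)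
--     balls = min(balls, 3)
--     strikes = min(strikes, 2)
--
--     return f"{balls}{strikes}"
-- ===== SOURCE B (Python) =====
-- # Table-driven finite-state machine over the 12 display counts "00".."32":
-- # saturation at 3 balls / 2 strikes is baked into the precomputed transition table.
-- _TRANS = {}
-- for _b in range(4):
--     for _s in range(3):
--         _st = f"{_b}{_s}"
--         _TRANS[(_st, "ball")] = f"{min(_b + 1, 3)}{_s}"
--         _TRANS[(_st, "strike")] = f"{_b}{min(_s + 1, 2)}"
--
-- def _pitch_class(c):
--     if c == "B":
--         return "ball"
--     if c in "SCFT":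
--         return "strike"
--     return None
--
-- def _calculate_count(pitches: str, start_count: str = "00") -> str:
--     # Same starting-count parsing as the original (incl. the try/except).
--     try:
--         start_balls = int(start_count[0]) if start_count else 0
--         start_strikes = int(start_count[1]) if start_count else 0
--     except (ValueError, IndexError):
--         start_balls, start_strikes = 0, 0
--     # Enter the 12-state display DFA (caps are saturating, so capping on entry
--     # is exact) and run the pitch sequence through the transition table.
--     state = f"{min(start_balls, 3)}{min(start_strikes, 2)}"
--     for c in pitches:
--         k = _pitch_class(c)
--         if k is not None:
--             state = _TRANS[(state, k)]
--     return state
-- ===== Notes on version B (the rewrite author's own statement) =====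
-- stated objective: alternative
-- what changed: Replaced the arithmetic branching loop over (balls, strikes) integers by a table-driven 12-state DFA over the display count strings: the saturating caps and the foul-ball two-strike guard disappear into a precomputed transition table, and the loop is pure table lookup on a string state.
import Mathlib
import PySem

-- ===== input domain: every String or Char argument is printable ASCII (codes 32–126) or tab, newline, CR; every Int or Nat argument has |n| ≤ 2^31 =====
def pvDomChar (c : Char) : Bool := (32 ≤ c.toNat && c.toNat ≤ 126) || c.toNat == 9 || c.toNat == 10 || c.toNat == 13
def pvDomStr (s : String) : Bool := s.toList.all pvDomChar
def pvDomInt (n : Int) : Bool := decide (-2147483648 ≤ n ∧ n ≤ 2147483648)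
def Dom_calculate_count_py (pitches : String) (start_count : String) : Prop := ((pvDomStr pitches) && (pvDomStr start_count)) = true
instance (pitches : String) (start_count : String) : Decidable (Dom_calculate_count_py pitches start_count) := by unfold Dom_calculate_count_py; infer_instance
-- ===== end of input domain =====

-- B replaces A's arithmetic branching loop by a table-driven 12-state DFA over the
-- display count strings themselves (caps and the foul guard are baked into the table).


-- ===== PORT A =====
-- shared by both ports: the try/except parsing of start_count, identical in A and B.
-- int(start_count[i]) = ofChars? of the one-character string; none = ValueError,
-- pyGet? none = IndexError; the except-branch yields (0, 0).
def pvStartCount (start_count : String) : Int × Int :=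
  let b? : Option Int :=
    if start_count.toList ≠ [] then
      (PySem.Str.pyGet? start_count 0).bind (fun c => PySem.Int.ofChars? [c])
    else some 0
  let s? : Option Int :=
    if start_count.toList ≠ [] then
      (PySem.Str.pyGet? start_count 1).bind (fun c => PySem.Int.ofChars? [c])
    else some 0
  match b?, s? with
  | some b, some s => (b, s)
  | _, _ => (0, 0)

-- one iteration of A's for-loop over (balls, strikes)
def pvStepA (st : Int × Int) (pitch : Char) : Int × Int :=
  if pitch == 'B' then (st.1 + 1, st.2)
  else if pitch == 'S' || pitch == 'C' then (st.1, st.2 + 1)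
  else if pitch == 'F' then (if st.2 < 2 then (st.1, st.2 + 1) else st)
  else if pitch == 'T' then (st.1, st.2 + 1)
  else st

def calculate_count_py (pitches : String) (start_count : String) : String :=
  let st0 := pvStartCount start_count
  let st := pitches.toList.foldl pvStepA st0
  String.ofList (PySem.Int.toChars (min st.1 3) ++ PySem.Int.toChars (min st.2 2))

-- ===== PORT B =====
-- f"{b}{s}" on two small ints
def pvFmt (b s : Int) : String :=
  String.ofList (PySem.Int.toChars b ++ PySem.Int.toChars s)

-- the module-level transition table _TRANS, built exactly as Source B builds it
def pvTrans : PySem.Dict (String × String) String :=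
  (PySem.List.pyRange 0 4 1).foldl (fun d b =>
    (PySem.List.pyRange 0 3 1).foldl (fun d s =>
      let st := pvFmt b s
      let d := PySem.Dict.insert d (st, "ball") (pvFmt (min (b + 1) 3) s)
      PySem.Dict.insert d (st, "strike") (pvFmt b (min (s + 1) 2))) d)
    (PySem.Dict.mk [])

-- _pitch_class: None → none
def pvPitchClass (c : Char) : Option String :=
  if c == 'B' then some "ball"
  else if c == 'S' || c == 'C' || c == 'F' || c == 'T' then some "strike"
  else none

-- one iteration of B's for-loop; _TRANS[(state, k)] is dict access (KeyError never
-- occurs: the state is always one of the 12 table states, proved below), so the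
-- getD fallback branch is unreachable and the port is exact.
def pvStepB (state : String) (c : Char) : String :=
  match pvPitchClass c with
  | some k => (PySem.Dict.get? pvTrans (state, k)).getD state
  | none => state

def calculate_count_py_alt (pitches : String) (start_count : String) : String :=
  let st0 := pvStartCount start_count
  let state0 := pvFmt (min st0.1 3) (min st0.2 2)
  pitches.toList.foldl pvStepB state0

-- ===== PRECONDITION & SPEC =====
def Spec_calculate_count_py (pitches : String) (start_count : String) (out : String) : Prop := out = calculate_count_py_alt pitches start_count
instance (pitches : String) (start_count : String) (out : String) : Decidable (Spec_calculate_count_py pitches start_count out) := by unfold Spec_calculate_count_py; infer_instance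

-- ===== CLAIM (what is proved, stated in full; the proofs are below) =====
def Claim_equal_calculate_count_py : Prop := ∀ (pitches : String) (start_count : String), Dom_calculate_count_py pitches start_count → Spec_calculate_count_py pitches start_count (calculate_count_py pitches start_count)

-- ===== LEMMAS AND PROOFS =====

-- the concrete table behaves as the saturating transition function on all 12 states
lemma pvTrans_ball (b s : Int) (hb0 : 0 ≤ b) (hb : b ≤ 3) (hs0 : 0 ≤ s) (hs : s ≤ 2) :
    PySem.Dict.get? pvTrans (pvFmt b s, "ball") = some (pvFmt (min (b + 1) 3) s) := by
  interval_cases b <;> interval_cases s <;> decide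

lemma pvTrans_strike (b s : Int) (hb0 : 0 ≤ b) (hb : b ≤ 3) (hs0 : 0 ≤ s) (hs : s ≤ 2) :
    PySem.Dict.get? pvTrans (pvFmt b s, "strike") = some (pvFmt b (min (s + 1) 2)) := by
  interval_cases b <;> interval_cases s <;> decide

-- one step of B's DFA tracks one step of A's arithmetic loop, through the display cap
lemma pvStep_sim (b s : Int) (hb : 0 ≤ b) (hs : 0 ≤ s) (c : Char) :
    pvStepB (pvFmt (min b 3) (min s 2)) c
      = pvFmt (min (pvStepA (b, s) c).1 3) (min (pvStepA (b, s) c).2 2) := by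
  by_cases hB : c = 'B'
  · subst hB
    simp only [pvStepB, show pvPitchClass 'B' = some "ball" from rfl]
    rw [pvTrans_ball (min b 3) (min s 2) (by omega) (by omega) (by omega) (by omega)]
    simp only [Option.getD_some, pvStepA]
    have : min (min b 3 + 1) 3 = min (b + 1) 3 := by omega
    rw [this]; rfl
  · by_cases hS : c = 'S' ∨ c = 'C' ∨ c = 'F' ∨ c = 'T'
    · have hcls : pvPitchClass c = some "strike" := by
        rcases hS with h | h | h | h <;> subst h <;> rfl
      simp only [pvStepB, hcls]
      rw [pvTrans_strike (min b 3) (min s 2) (by omega) (by omega) (by omega) (by omega)]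
      simp only [Option.getD_some]
      have h1 : (pvStepA (b, s) c).1 = b := by
        rcases hS with h | h | h | h <;> subst h <;>
          first
          | (simp [pvStepA]; split_ifs <;> rfl)
          | simp [pvStepA]
      have h2 : min (min s 2 + 1) 2 = min ((pvStepA (b, s) c).2) 2 := by
        rcases hS with h | h | h | h <;> subst h <;>
          first
          | (simp [pvStepA]; split_ifs <;> omega)
          | (simp [pvStepA]; omega)
      rw [h1, ← h2]
    · push Not at hS
      obtain ⟨h1, h2, h3, h4⟩ := hS
      have hcls : pvPitchClass c = none := by simp [pvPitchClass, hB, h1, h2, h3, h4]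
      have hstep : pvStepA (b, s) c = (b, s) := by simp [pvStepA, hB, h1, h2, h3, h4]
      simp only [pvStepB, hcls, hstep]

-- A's loop state stays nonnegative when it starts nonnegative
lemma pvStepA_nonneg (b s : Int) (hb : 0 ≤ b) (hs : 0 ≤ s) (c : Char) :
    0 ≤ (pvStepA (b, s) c).1 ∧ 0 ≤ (pvStepA (b, s) c).2 := by
  unfold pvStepA; split_ifs <;> simp <;> omega

-- the whole loops agree (modulo the display cap applied by pvFmt)
lemma pvLoop_sim (l : List Char) : ∀ (b s : Int), 0 ≤ b → 0 ≤ s →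
    l.foldl pvStepB (pvFmt (min b 3) (min s 2))
      = pvFmt (min (l.foldl pvStepA (b, s)).1 3) (min (l.foldl pvStepA (b, s)).2 2) := by
  induction l with
  | nil => intro b s _ _; rfl
  | cons c l ih =>
    intro b s hb hs
    obtain ⟨hb', hs'⟩ := pvStepA_nonneg b s hb hs c
    simp only [List.foldl_cons, pvStep_sim b s hb hs c]
    have := ih (pvStepA (b, s) c).1 (pvStepA (b, s) c).2 hb' hs'
    simpa using this

-- a successful int() of a single character is a digit value, hence nonnegative
lemma pvOfChars_singleton_nonneg (c : Char) (v : Int)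
    (h : PySem.Int.ofChars? [c] = some v) : 0 ≤ v := by
  by_cases hm : c = '-'
  · subst hm
    rw [show PySem.Int.ofChars? ['-'] = none from by decide] at h
    cases h
  by_cases hp : c = '+'
  · subst hp
    rw [show PySem.Int.ofChars? ['+'] = none from by decide] at h
    cases h
  unfold PySem.Int.ofChars? at h
  by_cases hsp : PySem.Int.isIntSpace c = true
  · simp only [List.dropWhile_cons, hsp, if_true, List.dropWhile_nil, List.reverse_nil] at h
    simp only [Option.map_eq_some_iff, bind, Option.bind_eq_some_iff] at h
    obtain ⟨n, ⟨a, _, ha⟩, hv⟩ := h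
    simp only [pure, Option.some.injEq] at ha
    omega
  · simp only [List.dropWhile_cons, hsp] at h
    split at h
    next ds heq => simp_all
    next ds heq => simp_all
    next ds hne1 hne2 =>
      simp only [Option.map_eq_some_iff, bind, Option.bind_eq_some_iff] at h
      obtain ⟨n, ⟨a, _, ha⟩, hv⟩ := h
      simp only [pure, Option.some.injEq] at ha
      omega

-- the parsed starting count is nonnegative (a single digit, or the except-branch 0)
lemma pvStartCount_nonneg (sc : String) :
    0 ≤ (pvStartCount sc).1 ∧ 0 ≤ (pvStartCount sc).2 := by
  unfold pvStartCount
  by_cases h : sc.toList = []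
  · simp [h]
  · simp only [ne_eq, h, not_false_eq_true, if_true]
    rcases hb : (PySem.Str.pyGet? sc 0).bind (fun c => PySem.Int.ofChars? [c]) with _ | b <;>
      rcases hs : (PySem.Str.pyGet? sc 1).bind (fun c => PySem.Int.ofChars? [c]) with _ | s <;>
        simp only
    · exact ⟨le_refl 0, le_refl 0⟩
    · exact ⟨le_refl 0, le_refl 0⟩
    · exact ⟨le_refl 0, le_refl 0⟩
    · rw [Option.bind_eq_some_iff] at hb hs
      obtain ⟨c0, -, hb⟩ := hb
      obtain ⟨c1, -, hs⟩ := hs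
      exact ⟨pvOfChars_singleton_nonneg c0 b hb, pvOfChars_singleton_nonneg c1 s hs⟩

-- ===== VERDICT (by name: the statement is the Claim_ definition above) =====
theorem calculate_count_py_spec : Claim_equal_calculate_count_py := by
  intro pitches start_count _
  unfold Spec_calculate_count_py calculate_count_py calculate_count_py_alt
  obtain ⟨hb, hs⟩ := pvStartCount_nonneg start_count
  exact (pvLoop_sim pitches.toList _ _ hb hs).symm
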